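-- pv_equiv track=rewrite | github.com/yas1nsyed/CADomatic | src/rag_builder.py | is_excluded_url
-- ===== SOURCE A (Python) =====
-- LANG_IDENTIFIERS = [
--     "/id", "/de", "/tr", "/es", "/fr", "/hr", "/it", "/pl",
--     "/pt", "/pt-br", "/ro", "/fi", "/sv", "/cs", "/ru", "/zh-cn",
--     "/zh-tw", "/ja", "/ko"
-- ]
--
-- def is_excluded_url(url):
--     url_lower = url.lower()
--     return (
--         any(lang in url_lower for lang in LANG_IDENTIFIERS) or
--         ".jpg" in url_lower or
--         ".png" in url_lower or
--         "edit&section" in url_lower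
--     )
-- ===== SOURCE B (Python) =====
-- _TWO = {"id", "de", "tr", "es", "fr", "hr", "it", "pl",
--         "pt", "ro", "fi", "sv", "cs", "ru", "ja", "ko"}
--
-- def is_excluded_url(url):
--     # single left-to-right scan: dispatch on the current character; "/pt-br" is
--     # absorbed by "/pt", so only "zh-cn"/"zh-tw" need a long look-ahead after '/'
--     s = url.lower()
--     for i, c in enumerate(s):
--         if c == '/':
--             if s[i + 1:i + 3] in _TWO or s[i + 1:i + 6] in ("zh-cn", "zh-tw"):
--                 return True
--         elif c == '.':
--             if s[i + 1:i + 4] in ("jpg", "png"):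
--                 return True
--         elif c == 'e':
--             if s.startswith("dit&section", i + 1):
--                 return True
--     return False
-- ===== Notes on version B (the rewrite author's own statement) =====
-- stated objective: alternative
-- what changed: B replaces A's 22 independent whole-string substring scans with a single left-to-right scan that dispatches on the current character ('/', '.', 'e') and matches a reduced pattern set (the redundant '/pt-br' is absorbed by '/pt'), via fixed-width slice lookups in a set of two-letter codes.
import Mathlib
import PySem

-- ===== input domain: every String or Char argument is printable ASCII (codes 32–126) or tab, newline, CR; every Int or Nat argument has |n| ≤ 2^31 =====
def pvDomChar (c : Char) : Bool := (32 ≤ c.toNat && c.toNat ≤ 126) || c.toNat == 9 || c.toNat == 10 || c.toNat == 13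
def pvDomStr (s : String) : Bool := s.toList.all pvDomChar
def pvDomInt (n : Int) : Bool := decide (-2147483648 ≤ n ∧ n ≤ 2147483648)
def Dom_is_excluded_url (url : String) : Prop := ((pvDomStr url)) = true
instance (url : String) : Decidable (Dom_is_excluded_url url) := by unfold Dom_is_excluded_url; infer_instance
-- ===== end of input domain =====

-- B replaces A's 22 independent whole-string substring scans by ONE left-to-right scan that
-- dispatches on the current character ('/', '.', 'e') into a reduced pattern set ("/pt-br" is
-- absorbed by "/pt", which is also a pattern).

-- ===== PORT A =====
def pvLangIdentifiers : List String :=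
  ["/id", "/de", "/tr", "/es", "/fr", "/hr", "/it", "/pl",
   "/pt", "/pt-br", "/ro", "/fi", "/sv", "/cs", "/ru", "/zh-cn",
   "/zh-tw", "/ja", "/ko"]

def is_excluded_url (url : String) : Bool :=
  let url_lower := PySem.Str.lower url
  (pvLangIdentifiers.any (fun lang => PySem.Str.isIn lang url_lower)) ||
    PySem.Str.isIn ".jpg" url_lower ||
    PySem.Str.isIn ".png" url_lower ||
    PySem.Str.isIn "edit&section" url_lower

-- ===== PORT B =====
-- the 16 two-letter codes that may follow '/' (Python's _TWO set)
def pvTwo : List (List Char) :=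
  [['i','d'], ['d','e'], ['t','r'], ['e','s'], ['f','r'], ['h','r'], ['i','t'], ['p','l'],
   ['p','t'], ['r','o'], ['f','i'], ['s','v'], ['c','s'], ['r','u'], ['j','a'], ['k','o']]

-- what Python's loop body decides at one position (the slices s[i+1:i+k] are takes of the suffix)
def pvHit (c : Char) (rest : List Char) : Bool :=
  if c = '/' then
    pvTwo.contains (rest.take 2) ||
      (rest.take 5 == ['z','h','-','c','n'] || rest.take 5 == ['z','h','-','t','w'])
  else if c = '.' then
    rest.take 3 == ['j','p','g'] || rest.take 3 == ['p','n','g']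
  else if c = 'e' then
    List.isPrefixOf ['d','i','t','&','s','e','c','t','i','o','n'] rest
  else false

-- the for-loop over enumerate(s) with its early return
def pvScanB : List Char → Bool
  | [] => false
  | c :: rest => pvHit c rest || pvScanB rest

def is_excluded_url_alt (url : String) : Bool :=
  pvScanB (PySem.Str.lower url).toList

-- ===== PRECONDITION & SPEC =====
def Spec_is_excluded_url (url : String) (out : Bool) : Prop := out = is_excluded_url_alt url
instance (url : String) (out : Bool) : Decidable (Spec_is_excluded_url url out) := by unfold Spec_is_excluded_url; infer_instance

-- ===== CLAIM (what is proved, stated in full; the proofs are below) =====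
def Claim_equal_is_excluded_url : Prop := ∀ (url : String), Dom_is_excluded_url url → Spec_is_excluded_url url (is_excluded_url url)

-- ===== LEMMAS AND PROOFS =====

-- A's full pattern list, as explicit char lists
def pvPatsL : List (List Char) :=
  [['/','i','d'], ['/','d','e'], ['/','t','r'], ['/','e','s'], ['/','f','r'], ['/','h','r'],
   ['/','i','t'], ['/','p','l'], ['/','p','t'], ['/','p','t','-','b','r'], ['/','r','o'],
   ['/','f','i'], ['/','s','v'], ['/','c','s'], ['/','r','u'], ['/','z','h','-','c','n'],
   ['/','z','h','-','t','w'], ['/','j','a'], ['/','k','o'],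
   ['.','j','p','g'], ['.','p','n','g'],
   ['e','d','i','t','&','s','e','c','t','i','o','n']]

theorem pvPatsL_eq :
    pvPatsL = pvLangIdentifiers.map String.toList ++
      [".jpg".toList, ".png".toList, "edit&section".toList] := by decide

set_option maxHeartbeats 2000000

-- one position: B's dispatch decides exactly "some pattern of A starts here"
theorem pvHit_iff (c : Char) (rest : List Char) :
    pvHit c rest = true ↔ ∃ p ∈ pvPatsL, p <+: (c :: rest) := by
  have habs : ['p','t','-','b','r'] <+: rest → ['p','t'] <+: rest :=
    fun h => (List.prefix_iff_eq_take.mpr rfl).trans h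
  have htake2 : ∀ (a b : Char), (rest.take 2 == [a,b]) = true ↔ [a,b] <+: rest := by
    intro a b; rw [beq_iff_eq, eq_comm]; exact List.prefix_iff_eq_take.symm
  have htake3 : ∀ (a b d : Char), (rest.take 3 == [a,b,d]) = true ↔ [a,b,d] <+: rest := by
    intro a b d; rw [beq_iff_eq, eq_comm]; exact List.prefix_iff_eq_take.symm
  have htake5 : ∀ (a b d e f : Char), (rest.take 5 == [a,b,d,e,f]) = true ↔ [a,b,d,e,f] <+: rest := by
    intro a b d e f; rw [beq_iff_eq, eq_comm]; exact List.prefix_iff_eq_take.symm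
  by_cases hc1 : c = '/'
  case pos =>
    subst hc1
    simp only [pvHit, pvTwo, List.contains_cons, List.contains_nil, Bool.or_false, Bool.or_eq_true,
      htake2, htake3, htake5, List.isPrefixOf_iff_prefix, pvPatsL, List.mem_cons, List.not_mem_nil,
      exists_eq_or_imp, exists_eq_left, List.cons_prefix_cons,
      show (('/':Char)='/') = True from by decide, show (('/':Char)='.') = False from by decide,
      show (('/':Char)='e') = False from by decide, show (('.':Char)='/') = False from by decide,
      show (('e':Char)='/') = False from by decide,
      if_true, if_false, true_and, false_and, exists_false, false_or, or_false]
    tauto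
  case neg =>
  by_cases hc2 : c = '.'
  case pos =>
    subst hc2
    simp only [pvHit, pvTwo, List.contains_cons, List.contains_nil, Bool.or_false, Bool.or_eq_true,
      htake2, htake3, htake5, List.isPrefixOf_iff_prefix, pvPatsL, List.mem_cons, List.not_mem_nil,
      exists_eq_or_imp, exists_eq_left, List.cons_prefix_cons,
      show (('.':Char)='.') = True from by decide, show (('.':Char)='/') = False from by decide,
      show (('.':Char)='e') = False from by decide, show (('/':Char)='.') = False from by decide,
      show (('e':Char)='.') = False from by decide,
      if_true, if_false, true_and, false_and, exists_false, false_or, or_false]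
  case neg =>
  by_cases hc3 : c = 'e'
  case pos =>
    subst hc3
    simp only [pvHit, pvTwo, List.contains_cons, List.contains_nil, Bool.or_false, Bool.or_eq_true,
      htake2, htake3, htake5, List.isPrefixOf_iff_prefix, pvPatsL, List.mem_cons, List.not_mem_nil,
      exists_eq_or_imp, exists_eq_left, List.cons_prefix_cons,
      show (('e':Char)='e') = True from by decide, show (('e':Char)='/') = False from by decide,
      show (('e':Char)='.') = False from by decide, show (('/':Char)='e') = False from by decide,
      show (('.':Char)='e') = False from by decide,
      if_true, if_false, true_and, false_and, exists_false, false_or, or_false]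
  case neg =>
    simp only [pvHit, if_neg hc1, if_neg hc2, if_neg hc3, pvPatsL, List.mem_cons,
      List.not_mem_nil, exists_eq_or_imp, exists_eq_left, List.cons_prefix_cons,
      iff_false_intro (Ne.symm hc1), iff_false_intro (Ne.symm hc2), iff_false_intro (Ne.symm hc3),
      false_and, exists_false, false_or, or_false]
    simp

-- the scan finds a hit iff some pattern occurs at some position
theorem pvScanB_iff (cs : List Char) :
    pvScanB cs = true ↔ ∃ p ∈ pvPatsL, ∃ j, p <+: cs.drop j := by
  induction cs with
  | nil =>
    simp only [pvScanB, Bool.false_eq_true, false_iff]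
    rintro ⟨p, hp, j, hpre⟩
    rw [List.drop_nil] at hpre
    rw [List.prefix_nil.mp hpre] at hp
    revert hp
    decide
  | cons c cs ih =>
    simp only [pvScanB, Bool.or_eq_true, pvHit_iff, ih]
    constructor
    · rintro (⟨p, hp, hpre⟩ | ⟨p, hp, j, hpre⟩)
      · exact ⟨p, hp, 0, by simpa using hpre⟩
      · exact ⟨p, hp, j + 1, by simpa using hpre⟩
    · rintro ⟨p, hp, j, hpre⟩
      cases j with
      | zero => exact Or.inl ⟨p, hp, by simpa using hpre⟩
      | succ j => exact Or.inr ⟨p, hp, j, by simpa using hpre⟩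

theorem pvScanB_eq_any (cs : List Char) :
    pvScanB cs = pvPatsL.any (fun p => PySem.Chars.isIn p cs) := by
  rw [Bool.eq_iff_iff, pvScanB_iff]
  simp [List.any_eq_true, ← PySem.Chars.exists_prefix_drop_iff_isIn]

-- ===== VERDICT (by name: the statement is the Claim_ definition above) =====
theorem is_excluded_url_spec : Claim_equal_is_excluded_url := by
  intro url _
  unfold Spec_is_excluded_url is_excluded_url is_excluded_url_alt
  rw [pvScanB_eq_any, pvPatsL_eq]
  simp [pvLangIdentifiers, Bool.or_assoc]
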